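-- pv_equiv track=rewrite | github.com/PranavPutsa1006/Compiler-Design | Compiler_design/lf2.py | find_prefix_suffixes
-- ===== SOURCE A (Python) =====
-- def find_prefix_suffixes(strings, prefixes):
--     prefix_suffix = dict()
--     for s in strings:
--         for prefix in sorted(list(prefixes), key=lambda x: len(x), reverse=True):
--             if s.startswith(prefix):
--                 if prefix in prefix_suffix:
--                     prefix_suffix[prefix].add(s.replace(prefix, '', 1))
--                 else:
--                     prefix_suffix[prefix] = set([s.replace(prefix, '', 1)])
--     return prefix_suffix
-- ===== SOURCE B (Python) =====
-- def find_prefix_suffixes(strings, prefixes):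
--     # Hash-set of prefixes + distinct prefix lengths (longest first):
--     # per string we test one slice per distinct length instead of
--     # re-sorting and scanning the whole prefix list.
--     prefix_set = set(prefixes)
--     lengths = sorted({len(p) for p in prefixes}, reverse=True)
--     result = {}
--     for s in strings:
--         n = len(s)
--         for L in lengths:
--             if L <= n and s[:L] in prefix_set:
--                 p = s[:L]
--                 if p in result:
--                     result[p].add(s[L:])
--                 else:
--                     result[p] = {s[L:]}
--     return result
-- ===== Notes on version B (the rewrite author's own statement) =====
-- stated objective: faster
-- what changed: Instead of re-sorting the whole prefix list inside the per-string loop and scanning every prefix with startswith, B builds a hash set of prefixes and the descending list of distinct prefix lengths once, and per string tests one slice s[:L] per distinct length against the set.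
import Mathlib
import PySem

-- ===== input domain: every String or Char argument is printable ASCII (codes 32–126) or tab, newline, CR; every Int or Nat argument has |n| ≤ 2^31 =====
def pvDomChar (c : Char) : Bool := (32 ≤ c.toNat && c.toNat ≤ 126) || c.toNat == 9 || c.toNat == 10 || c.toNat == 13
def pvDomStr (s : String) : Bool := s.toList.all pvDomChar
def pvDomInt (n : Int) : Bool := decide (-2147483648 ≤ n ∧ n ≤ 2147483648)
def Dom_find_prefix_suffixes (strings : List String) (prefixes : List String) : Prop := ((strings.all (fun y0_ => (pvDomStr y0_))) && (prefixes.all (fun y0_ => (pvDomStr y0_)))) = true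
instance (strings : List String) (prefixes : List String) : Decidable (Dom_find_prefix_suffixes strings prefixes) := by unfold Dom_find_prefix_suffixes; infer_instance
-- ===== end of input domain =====

-- B replaces A's per-string re-sort + full scan of the prefix list by a prefix hash-set
-- plus one membership test per distinct prefix length; return values proved identical.

-- ===== PORT A =====
def find_prefix_suffixes (strings : List String) (prefixes : List String) : List (String × List String) :=
  (strings.foldl
    (fun prefix_suffix s =>
      (PySem.List.sorted prefixes (fun x => PySem.Str.len x) true).foldl
        (fun prefix_suffix prefix_ =>
          if PySem.Str.startswith s prefix_ then
            -- s.replace(prefix, '', 1): exact as dropping len(prefix) chars here, since the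
            -- guard guarantees the first occurrence of prefix in s is at index 0
            let suf := String.ofList (s.toList.drop prefix_.toList.length)
            if prefix_suffix.contains prefix_ then
              prefix_suffix.modify prefix_ PySem.Set.empty (fun t => PySem.Set.add t suf)
            else
              prefix_suffix.insert prefix_ (PySem.Set.ofList [suf])
          else prefix_suffix)
        prefix_suffix)
    PySem.Dict.empty).items

-- ===== PORT B =====
def find_prefix_suffixes_alt (strings : List String) (prefixes : List String) : List (String × List String) :=
  let prefixSet : PySem.Set String := PySem.Set.ofList prefixes
  let lengths : List Int := PySem.List.sorted (PySem.Set.ofList (prefixes.map (fun p => PySem.Str.len p))) (fun x => x) true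
  (strings.foldl
    (fun result s =>
      let n := PySem.Str.len s
      lengths.foldl
        (fun result L =>
          if decide (L ≤ n) && PySem.Set.contains prefixSet (String.ofList (PySem.List.slice s.toList none (some L))) then
            let p := String.ofList (PySem.List.slice s.toList none (some L))
            if result.contains p then
              result.modify p PySem.Set.empty
                (fun t => PySem.Set.add t (String.ofList (PySem.List.slice s.toList (some L) none)))
            else
              result.insert p (PySem.Set.ofList [String.ofList (PySem.List.slice s.toList (some L) none)])
          else result)
        result)
    PySem.Dict.empty).items

-- ===== PRECONDITION & SPEC =====
def Spec_find_prefix_suffixes (strings : List String) (prefixes : List String) (out : List (String × List String)) : Prop := out = find_prefix_suffixes_alt strings prefixes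
instance (strings : List String) (prefixes : List String) (out : List (String × List String)) : Decidable (Spec_find_prefix_suffixes strings prefixes out) := by unfold Spec_find_prefix_suffixes; infer_instance

-- ===== CLAIM (what is proved, stated in full; the proofs are below) =====
def Claim_equal_find_prefix_suffixes : Prop := ∀ (strings : List String) (prefixes : List String), Dom_find_prefix_suffixes strings prefixes → Spec_find_prefix_suffixes strings prefixes (find_prefix_suffixes strings prefixes)

-- ===== LEMMAS AND PROOFS =====

-- proof-only abbreviations
def pvStep (d : PySem.Dict String (PySem.Set String)) (kv : String × String) : PySem.Dict String (PySem.Set String) :=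
  d.modify kv.1 PySem.Set.empty (fun t => PySem.Set.add t kv.2)

def pvFs (prefixes : List String) (s : String) : List String :=
  (PySem.List.sorted prefixes (fun x => PySem.Str.len x) true).filter (fun p => PySem.Str.startswith s p)

def pvLens (prefixes : List String) : List Int :=
  PySem.List.sorted (PySem.Set.ofList (prefixes.map (fun p => PySem.Str.len p))) (fun x => x) true

def pvKey (s : String) (L : Int) : String := String.ofList (PySem.List.slice s.toList none (some L))
def pvSuf (s : String) (L : Int) : String := String.ofList (PySem.List.slice s.toList (some L) none)

def pvMs (prefixes : List String) (s : String) : List Int :=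
  (pvLens prefixes).filter
    (fun L => decide (L ≤ PySem.Str.len s) && PySem.Set.contains (PySem.Set.ofList prefixes) (pvKey s L))

def pvPA (s : String) (l : List String) : List (String × String) :=
  l.map (fun p => (p, String.ofList (s.toList.drop p.toList.length)))
def pvPB (s : String) (l : List Int) : List (String × String) :=
  l.map (fun L => (pvKey s L, pvSuf s L))

-- basic Set lemmas
theorem pv_mem_contains {α : Type} [BEq α] [LawfulBEq α] (s : PySem.Set α) (x : α) :
    PySem.Set.contains s x = true ↔ x ∈ s := by
  simp [PySem.Set.contains]

theorem pv_add_self {α : Type} [BEq α] [LawfulBEq α] (s : PySem.Set α) (x : α) (h : x ∈ s) :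
    PySem.Set.add s x = s := by
  simp [PySem.Set.add, h]

theorem pv_mem_add {α : Type} [BEq α] [LawfulBEq α] (s : PySem.Set α) (x y : α) (h : x ∈ s) :
    x ∈ PySem.Set.add s y := by
  simp [PySem.Set.add]; split <;> simp [h]

theorem pv_mem_add_self {α : Type} [BEq α] [LawfulBEq α] (s : PySem.Set α) (x : α) :
    x ∈ PySem.Set.add s x := by
  by_cases h : x ∈ s
  · simp [PySem.Set.add]; split <;> simp [h]
  · simp [PySem.Set.add, PySem.Set.contains, h]

theorem pv_update_filter {α : Type} [BEq α] [LawfulBEq α] (l : List α) (t : PySem.Set α) (x : α) (h : x ∈ t) :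
    PySem.Set.update t l = PySem.Set.update t (l.filter (fun y => !(y == x))) := by
  induction l generalizing t with
  | nil => rfl
  | cons y l ih =>
    rw [List.filter_cons]
    by_cases hyx : y = x
    · subst hyx
      rw [if_neg (by simp)]
      show PySem.Set.update (PySem.Set.add t y) l = _
      rw [pv_add_self t y h]
      exact ih t h
    · rw [if_pos (by simp [hyx])]
      show PySem.Set.update (PySem.Set.add t y) l = PySem.Set.update (PySem.Set.add t y) _
      exact ih (PySem.Set.add t y) (pv_mem_add t x y h)

theorem pv_add_cons {α : Type} [BEq α] [LawfulBEq α] (t : PySem.Set α) (x y : α) (h : ¬ (y = x)) :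
    PySem.Set.add (x :: t) y = x :: PySem.Set.add t y := by
  have hc : (x :: t).contains y = t.contains y := by simp [List.contains_eq_mem, h]
  simp only [PySem.Set.add, PySem.Set.contains, hc]
  split <;> simp

theorem pv_update_cons {α : Type} [BEq α] [LawfulBEq α] (l : List α) (t : PySem.Set α) (x : α) (h : x ∉ l) :
    PySem.Set.update (x :: t) l = x :: PySem.Set.update t l := by
  induction l generalizing t with
  | nil => rfl
  | cons y l ih =>
    have hyx : ¬ (y = x) := fun he => h (he ▸ List.mem_cons_self)
    have hxl : x ∉ l := fun hm => h (List.mem_cons_of_mem _ hm)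
    show PySem.Set.update (PySem.Set.add (x :: t) y) l = x :: PySem.Set.update (PySem.Set.add t y) l
    rw [pv_add_cons t x y hyx]
    exact ih _ hxl

theorem pv_ofList_cons {α : Type} [BEq α] [LawfulBEq α] (x : α) (l : List α) :
    PySem.Set.ofList (x :: l) = x :: PySem.Set.ofList (l.filter (fun y => !(y == x))) := by
  have h0 : PySem.Set.ofList (x :: l) = PySem.Set.update (PySem.Set.add PySem.Set.empty x) l := rfl
  have h1 : PySem.Set.add (PySem.Set.empty : PySem.Set α) x = [x] := by
    simp [PySem.Set.add, PySem.Set.contains, PySem.Set.empty]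
  rw [h0, h1, pv_update_filter l [x] x (by simp)]
  rw [show ([x] : PySem.Set α) = x :: ([] : List α) from rfl]
  rw [pv_update_cons _ _ _ (by simp)]
  rfl

theorem pv_update_ofList {α : Type} [BEq α] [LawfulBEq α] (l : List α) (t : PySem.Set α) :
    PySem.Set.update t l = PySem.Set.update t (PySem.Set.ofList l) := by
  induction hn : l.length using Nat.strong_induction_on generalizing l t with
  | _ n ih =>
    cases l with
    | nil => rfl
    | cons x l' =>
      subst hn
      have hx : x ∈ PySem.Set.add t x := pv_mem_add_self t x
      have lhs : PySem.Set.update t (x :: l') = PySem.Set.update (PySem.Set.add t x) l' := rfl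
      rw [lhs, pv_update_filter l' (PySem.Set.add t x) x hx, pv_ofList_cons]
      have rhs : PySem.Set.update t (x :: PySem.Set.ofList (l'.filter (fun y => !(y == x))))
          = PySem.Set.update (PySem.Set.add t x) (PySem.Set.ofList (l'.filter (fun y => !(y == x)))) := rfl
      rw [rhs]
      exact ih _ (Nat.lt_succ_of_le (List.length_filter_le _ _)) _ _ rfl

theorem pv_update_mem_noop {α : Type} [BEq α] [LawfulBEq α] (n : Nat) (t : PySem.Set α) (x : α) (h : x ∈ t) :
    PySem.Set.update t (List.replicate n x) = t := by
  induction n generalizing t with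
  | zero => rfl
  | succ n ih =>
    show PySem.Set.update (PySem.Set.add t x) (List.replicate n x) = t
    rw [pv_add_self t x h]; exact ih t h

theorem pv_update_replicate {α : Type} [BEq α] [LawfulBEq α] (n : Nat) (t : PySem.Set α) (x : α) :
    PySem.Set.update t (List.replicate (n + 1) x) = PySem.Set.add t x := by
  show PySem.Set.update (PySem.Set.add t x) (List.replicate n x) = _
  exact pv_update_mem_noop n _ x (pv_mem_add_self t x)

theorem pv_update_sublist {α : Type} [BEq α] (l : List α) (s : PySem.Set α) :
    ∃ m, PySem.Set.update s l = s ++ m ∧ m.Sublist l := by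
  induction l generalizing s with
  | nil => exact ⟨[], by simp [PySem.Set.update], List.Sublist.refl _⟩
  | cons x l ih =>
    by_cases hc : PySem.Set.contains s x = true
    · obtain ⟨m, hm, hs⟩ := ih s
      refine ⟨m, ?_, hs.cons x⟩
      show PySem.Set.update (PySem.Set.add s x) l = s ++ m
      rw [show PySem.Set.add s x = s from by simp only [PySem.Set.add, if_pos hc]]
      exact hm
    · obtain ⟨m, hm, hs⟩ := ih (s ++ [x])
      refine ⟨x :: m, ?_, hs.cons₂ x⟩
      show PySem.Set.update (PySem.Set.add s x) l = s ++ x :: m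
      rw [Bool.not_eq_true] at hc
      rw [show PySem.Set.add s x = s ++ [x] from by simp only [PySem.Set.add, hc, Bool.false_eq_true, if_false]]
      rw [hm]
      simp

theorem pv_ofList_sublist {α : Type} [BEq α] (l : List α) : (PySem.Set.ofList l).Sublist l := by
  obtain ⟨m, hm, hs⟩ := pv_update_sublist l (PySem.Set.empty)
  have : PySem.Set.ofList l = PySem.Set.update PySem.Set.empty l := rfl
  rw [this, hm]
  simpa using hs

-- getD through a pvStep fold
theorem pv_getD_fold (l : List (String × String)) (d : PySem.Dict String (PySem.Set String)) (c : String) :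
    ((l.foldl pvStep d).getD c PySem.Set.empty)
      = PySem.Set.update (d.getD c PySem.Set.empty) ((l.filter (fun kv => kv.1 == c)).map (fun kv => kv.2)) := by
  induction l generalizing d with
  | nil => rfl
  | cons kv l ih =>
    show ((l.foldl pvStep (pvStep d kv)).getD c PySem.Set.empty) = _
    rw [ih (pvStep d kv), List.filter_cons]
    have hg : (pvStep d kv).getD c PySem.Set.empty
        = if c = kv.1 then PySem.Set.add (d.getD kv.1 PySem.Set.empty) kv.2 else d.getD c PySem.Set.empty :=
      PySem.Dict.getD_modify d kv.1 c PySem.Set.empty (fun t => PySem.Set.add t kv.2)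
    by_cases hk : kv.1 = c
    · rw [if_pos (by simp [hk]), hg, if_pos hk.symm, hk]
      rfl
    · rw [if_neg (by simp [hk]), hg, if_neg (fun he => hk he.symm)]

-- keys through a pvStep fold
theorem pv_keys_fold (l : List (String × String)) (d : PySem.Dict String (PySem.Set String)) :
    (l.foldl pvStep d).keys = PySem.Set.update d.keys (l.map Prod.fst) := by
  exact PySem.Dict.keys_foldl_modify_key l Prod.fst PySem.Set.empty
    (fun _ kv => fun t => PySem.Set.add t kv.2) d

theorem pv_nodup_keys_fold (l : List (String × String)) (d : PySem.Dict String (PySem.Set String))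
    (h : d.keys.Nodup) : (l.foldl pvStep d).keys.Nodup := by
  exact PySem.Dict.nodup_keys_foldl_modify_key l Prod.fst PySem.Set.empty
    (fun _ kv => fun t => PySem.Set.add t kv.2) d h

-- membership / length helpers
theorem pv_len_nonneg (prefixes : List String) (L : Int) (h : L ∈ pvLens prefixes) : 0 ≤ L := by
  unfold pvLens at h
  rw [PySem.List.mem_sorted, PySem.Set.mem_ofList, List.mem_map] at h
  obtain ⟨p, _, rfl⟩ := h
  rw [PySem.Str.len_eq]
  exact Int.natCast_nonneg _

theorem pv_key_toList (s : String) (L : Int) (h0 : 0 ≤ L) :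
    (pvKey s L).toList = s.toList.take L.toNat := by
  unfold pvKey
  rw [PySem.List.slice_to _ h0, String.toList_ofList]

theorem pv_key_strlen (s : String) (L : Int) (h0 : 0 ≤ L) (hle : L ≤ PySem.Str.len s) :
    PySem.Str.len (pvKey s L) = L := by
  rw [PySem.Str.len_eq, pv_key_toList s L h0, List.length_take]
  rw [PySem.Str.len_eq] at hle
  omega

theorem pv_mem_Fs (prefixes : List String) (s : String) (p : String) :
    p ∈ pvFs prefixes s ↔ p ∈ prefixes ∧ p.toList <+: s.toList := by
  unfold pvFs
  rw [List.mem_filter, PySem.List.mem_sorted, PySem.Str.startswith_eq, PySem.Chars.startswith_iff]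

theorem pv_contains_iff (prefixes : List String) (x : String) :
    (PySem.Set.contains (PySem.Set.ofList prefixes) x = true) ↔ x ∈ prefixes :=
  (pv_mem_contains _ _).trans (PySem.Set.mem_ofList _ _)

theorem pv_mem_Ms (prefixes : List String) (s : String) (L : Int) :
    L ∈ pvMs prefixes s ↔ L ∈ pvLens prefixes ∧ L ≤ PySem.Str.len s ∧ pvKey s L ∈ prefixes := by
  unfold pvMs
  rw [List.mem_filter, Bool.and_eq_true, decide_eq_true_eq, pv_contains_iff]

theorem pv_mem_lens (prefixes : List String) (L : Int) :
    L ∈ pvLens prefixes ↔ ∃ p ∈ prefixes, PySem.Str.len p = L := by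
  unfold pvLens
  rw [PySem.List.mem_sorted, PySem.Set.mem_ofList, List.mem_map]

theorem pv_key_of_prefix (s x : String) (hpre : x.toList <+: s.toList) :
    pvKey s (PySem.Str.len x) = x := by
  have h0 : (0 : Int) ≤ PySem.Str.len x := by rw [PySem.Str.len_eq]; exact Int.natCast_nonneg _
  have ht : x.toList = s.toList.take x.toList.length := List.prefix_iff_eq_take.mp hpre
  have : (pvKey s (PySem.Str.len x)).toList = x.toList := by
    rw [pv_key_toList _ _ h0, PySem.Str.len_eq, Int.toNat_natCast, ← ht]
  calc pvKey s (PySem.Str.len x)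
      = String.ofList (pvKey s (PySem.Str.len x)).toList := String.ofList_toList.symm
    _ = String.ofList x.toList := by rw [this]
    _ = x := String.ofList_toList

theorem pv_mem_Msmap (prefixes : List String) (s : String) (x : String) :
    x ∈ (pvMs prefixes s).map (pvKey s) ↔ x ∈ prefixes ∧ x.toList <+: s.toList := by
  rw [List.mem_map]
  constructor
  · rintro ⟨L, hL, rfl⟩
    obtain ⟨hlens, _, hmem⟩ := (pv_mem_Ms prefixes s L).mp hL
    exact ⟨hmem, by rw [pv_key_toList s L (pv_len_nonneg prefixes L hlens)]; exact List.take_prefix _ _⟩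
  · rintro ⟨hx, hpre⟩
    have hkey := pv_key_of_prefix s x hpre
    refine ⟨PySem.Str.len x, (pv_mem_Ms prefixes s _).mpr ⟨?_, ?_, ?_⟩, hkey⟩
    · exact (pv_mem_lens prefixes _).mpr ⟨x, hx, rfl⟩
    · rw [PySem.Str.len_eq, PySem.Str.len_eq]
      exact_mod_cast List.IsPrefix.length_le hpre
    · rw [hkey]; exact hx

-- each matched prefix is the take of its own length
theorem pv_Fs_take (prefixes : List String) (s : String) (p : String) (h : p ∈ pvFs prefixes s) :
    p.toList = s.toList.take p.toList.length :=
  List.prefix_iff_eq_take.mp ((pv_mem_Fs prefixes s p).mp h).2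

-- the combinatorial core: first occurrences of matched prefixes (longest first)
-- are exactly the matched distinct lengths (descending) mapped to slices of s
theorem pv_core (prefixes : List String) (s : String) :
    PySem.Set.ofList (pvFs prefixes s) = (pvMs prefixes s).map (pvKey s) := by
  have hFsub := pv_ofList_sublist (pvFs prefixes s)
  have hFpw_le : (pvFs prefixes s).Pairwise (fun a b => PySem.Str.len b ≤ PySem.Str.len a) :=
    (PySem.List.sorted_pairwise_rev prefixes (fun x => PySem.Str.len x)).filter _
  have hFpw := hFpw_le.sublist hFsub
  have hFnd : (PySem.Set.ofList (pvFs prefixes s)).Nodup := PySem.Set.nodup_ofList _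
  have hFstrict : (PySem.Set.ofList (pvFs prefixes s)).Pairwise
      (fun a b => PySem.Str.len b < PySem.Str.len a) := by
    refine (hFpw.and hFnd).imp_of_mem ?_
    intro a b ha hb hab
    refine lt_of_le_of_ne hab.1 ?_
    intro hlen
    apply hab.2
    have ha' := pv_Fs_take prefixes s a (hFsub.mem ha)
    have hb' := pv_Fs_take prefixes s b (hFsub.mem hb)
    have hlen' : a.toList.length = b.toList.length := by
      have := hlen
      rw [PySem.Str.len_eq, PySem.Str.len_eq] at this
      exact_mod_cast this.symm
    have : a.toList = b.toList := by rw [ha', hb', hlen']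
    calc a = String.ofList a.toList := String.ofList_toList.symm
      _ = String.ofList b.toList := by rw [this]
      _ = b := String.ofList_toList
  have hLnd : (pvLens prefixes).Nodup :=
    (PySem.List.sorted_perm _ _ _).symm.nodup (PySem.Set.nodup_ofList _)
  have hLpw : (pvLens prefixes).Pairwise (fun a b => b < a) := by
    refine ((PySem.List.sorted_pairwise_rev _ (fun x => x)).and hLnd).imp_of_mem ?_
    intro a b _ _ hab
    exact lt_of_le_of_ne hab.1 (fun he => hab.2 he.symm)
  have hMpw : (pvMs prefixes s).Pairwise (fun a b => b < a) := hLpw.filter _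
  have hRpw : ((pvMs prefixes s).map (pvKey s)).Pairwise
      (fun a b => PySem.Str.len b < PySem.Str.len a) := by
    rw [List.pairwise_map]
    refine hMpw.imp_of_mem ?_
    intro a b ha hb hab
    obtain ⟨hal, hale, _⟩ := (pv_mem_Ms prefixes s a).mp ha
    obtain ⟨hbl, hble, _⟩ := (pv_mem_Ms prefixes s b).mp hb
    rw [pv_key_strlen s a (pv_len_nonneg prefixes a hal) hale,
        pv_key_strlen s b (pv_len_nonneg prefixes b hbl) hble]
    exact hab
  have hRnd : ((pvMs prefixes s).map (pvKey s)).Nodup :=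
    hRpw.imp (fun h => fun he => absurd (he ▸ h) (lt_irrefl _))
  have hperm : (PySem.Set.ofList (pvFs prefixes s)).Perm ((pvMs prefixes s).map (pvKey s)) := by
    rw [List.perm_ext_iff_of_nodup hFnd hRnd]
    intro x
    rw [PySem.Set.mem_ofList, pv_mem_Fs, pv_mem_Msmap]
  have h1 : PySem.List.sorted ((pvMs prefixes s).map (pvKey s)) (fun x => PySem.Str.len x) true
      = PySem.Set.ofList (pvFs prefixes s) :=
    PySem.List.sorted_rev_eq_of_perm_of_pairwise_gt _ _ _ hperm hFstrict
  have h2 : PySem.List.sorted ((pvMs prefixes s).map (pvKey s)) (fun x => PySem.Str.len x) true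
      = (pvMs prefixes s).map (pvKey s) :=
    PySem.List.sorted_rev_eq_of_perm_of_pairwise_gt _ _ _ (List.Perm.refl _) hRpw
  exact h1.symm.trans h2

-- per-key value equality across one string
theorem pv_getD_eq (prefixes : List String) (s : String) (d : PySem.Dict String (PySem.Set String)) (c : String) :
    ((pvPA s (pvFs prefixes s)).foldl pvStep d).getD c PySem.Set.empty
      = ((pvPB s (pvMs prefixes s)).foldl pvStep d).getD c PySem.Set.empty := by
  rw [pv_getD_fold, pv_getD_fold]
  have hAlist : ((pvPA s (pvFs prefixes s)).filter (fun kv => kv.1 == c)).map (fun kv => kv.2)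
      = List.replicate (List.count c (pvFs prefixes s)) (String.ofList (s.toList.drop c.toList.length)) := by
    unfold pvPA
    rw [List.filter_map, List.map_map]
    have hpred : ((pvFs prefixes s).filter ((fun kv => kv.1 == c) ∘ (fun p => (p, String.ofList (s.toList.drop p.toList.length)))))
        = (pvFs prefixes s).filter (fun p => p == c) := by
      apply List.filter_congr
      intro p _
      rfl
    rw [hpred, List.filter_beq, List.map_replicate]
    rfl
  have hBlist : ((pvPB s (pvMs prefixes s)).filter (fun kv => kv.1 == c)).map (fun kv => kv.2)
      = ((pvMs prefixes s).filter (fun L => pvKey s L == c)).map (fun L => pvSuf s L) := by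
    unfold pvPB
    rw [List.filter_map, List.map_map]
    rfl
  rw [hAlist, hBlist]
  by_cases hc : c ∈ pvFs prefixes s
  · -- c is a matched prefix: both sides add the one suffix
    obtain ⟨n, hn⟩ : ∃ n, List.count c (pvFs prefixes s) = n + 1 :=
      ⟨List.count c (pvFs prefixes s) - 1, by have := List.count_pos_iff.mpr hc; omega⟩
    rw [hn, pv_update_replicate]
    have hcR : c ∈ (pvMs prefixes s).map (pvKey s) := by
      rw [← pv_core prefixes s, PySem.Set.mem_ofList]; exact hc
    obtain ⟨L0, hL0, hkey0⟩ := List.mem_map.mp hcR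
    have hRnd : ((pvMs prefixes s).map (pvKey s)).Nodup := by
      rw [← pv_core prefixes s]; exact PySem.Set.nodup_ofList _
    have hMnd : (pvMs prefixes s).Nodup := List.Nodup.of_map _ hRnd
    have hfilter : (pvMs prefixes s).filter (fun L => pvKey s L == c)
        = List.replicate (List.count L0 (pvMs prefixes s)) L0 := by
      rw [List.filter_congr (q := fun L => L == L0) ?_, List.filter_beq]
      intro L hL
      rw [Bool.eq_iff_iff]
      simp only [beq_iff_eq]
      constructor
      · intro hkeq
        exact List.inj_on_of_nodup_map hRnd hL hL0 (hkeq.trans hkey0.symm)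
      · intro he; subst he; exact hkey0
    rw [hfilter, List.count_eq_one_of_mem hMnd hL0, List.map_replicate]
    show _ = PySem.Set.update _ (List.replicate (0 + 1) (pvSuf s L0))
    rw [pv_update_replicate]
    -- the added suffixes agree
    obtain ⟨hL0lens, hL0le, _⟩ := (pv_mem_Ms prefixes s L0).mp hL0
    have h0 : 0 ≤ L0 := pv_len_nonneg prefixes L0 hL0lens
    have hclen : c.toList.length = L0.toNat := by
      rw [← hkey0, pv_key_toList s L0 h0, List.length_take]
      rw [PySem.Str.len_eq] at hL0le
      omega
    have hsuf : String.ofList (s.toList.drop c.toList.length) = pvSuf s L0 := by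
      unfold pvSuf
      rw [PySem.List.slice_from _ h0, hclen]
    rw [hsuf]
  · -- c unmatched: both filtered lists are empty
    have h0 : List.count c (pvFs prefixes s) = 0 := by
      rw [List.count_eq_zero]; exact hc
    rw [h0]
    have hBnil : (pvMs prefixes s).filter (fun L => pvKey s L == c) = [] := by
      rw [List.filter_eq_nil_iff]
      intro L hL hbeq
      apply hc
      have : c ∈ (pvMs prefixes s).map (pvKey s) :=
        List.mem_map.mpr ⟨L, hL, by simpa using hbeq⟩
      rw [← pv_core prefixes s, PySem.Set.mem_ofList] at this
      exact this
    rw [hBnil]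
    rfl

-- per-string fold equality
theorem pv_string_step (prefixes : List String) (s : String) (d : PySem.Dict String (PySem.Set String))
    (hd : d.keys.Nodup) :
    ((pvPA s (pvFs prefixes s)).foldl pvStep d) = ((pvPB s (pvMs prefixes s)).foldl pvStep d) := by
  have hA := pv_nodup_keys_fold (pvPA s (pvFs prefixes s)) d hd
  have hB := pv_nodup_keys_fold (pvPB s (pvMs prefixes s)) d hd
  apply PySem.Dict.ext
  rw [PySem.Dict.items_eq_map_keys _ hA PySem.Set.empty,
      PySem.Dict.items_eq_map_keys _ hB PySem.Set.empty]
  have hkeys : ((pvPA s (pvFs prefixes s)).foldl pvStep d).keys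
      = ((pvPB s (pvMs prefixes s)).foldl pvStep d).keys := by
    rw [pv_keys_fold, pv_keys_fold]
    have h1 : (pvPA s (pvFs prefixes s)).map Prod.fst = pvFs prefixes s := by
      unfold pvPA; rw [List.map_map]; exact List.map_id' _
    have h2 : (pvPB s (pvMs prefixes s)).map Prod.fst = (pvMs prefixes s).map (pvKey s) := by
      unfold pvPB; rw [List.map_map]; rfl
    rw [h1, h2, pv_update_ofList, pv_core]
  rw [hkeys]
  apply List.map_congr_left
  intro k _
  rw [pv_getD_eq]

-- the ports' inner loops are the pvStep folds
theorem pv_innerA (prefixes : List String) (s : String) (d : PySem.Dict String (PySem.Set String)) :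
    ((PySem.List.sorted prefixes (fun x => PySem.Str.len x) true).foldl
      (fun prefix_suffix prefix_ =>
        if PySem.Str.startswith s prefix_ then
          let suf := String.ofList (s.toList.drop prefix_.toList.length)
          if prefix_suffix.contains prefix_ then
            prefix_suffix.modify prefix_ PySem.Set.empty (fun t => PySem.Set.add t suf)
          else
            prefix_suffix.insert prefix_ (PySem.Set.ofList [suf])
        else prefix_suffix)
      d)
    = (pvPA s (pvFs prefixes s)).foldl pvStep d := by
  unfold pvPA pvFs
  rw [List.foldl_map, List.foldl_filter]
  congr 1
  funext d' p
  by_cases hm : PySem.Str.startswith s p = true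
  · rw [if_pos hm, if_pos hm]
    by_cases hcont : d'.contains p = true
    · rw [if_pos hcont]; rfl
    · rw [if_neg hcont]
      show d'.insert p _ = d'.modify p PySem.Set.empty _
      unfold PySem.Dict.modify
      rw [PySem.Dict.getD_of_not_contains d' PySem.Set.empty (by simpa using hcont)]
      rfl
  · rw [if_neg hm, if_neg hm]

theorem pv_innerB (prefixes : List String) (s : String) (d : PySem.Dict String (PySem.Set String)) :
    ((pvLens prefixes).foldl
      (fun result L =>
        if decide (L ≤ PySem.Str.len s) && PySem.Set.contains (PySem.Set.ofList prefixes) (String.ofList (PySem.List.slice s.toList none (some L))) then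
          let p := String.ofList (PySem.List.slice s.toList none (some L))
          if result.contains p then
            result.modify p PySem.Set.empty
              (fun t => PySem.Set.add t (String.ofList (PySem.List.slice s.toList (some L) none)))
          else
            result.insert p (PySem.Set.ofList [String.ofList (PySem.List.slice s.toList (some L) none)])
        else result)
      d)
    = (pvPB s (pvMs prefixes s)).foldl pvStep d := by
  unfold pvPB pvMs
  rw [List.foldl_map, List.foldl_filter]
  congr 1
  funext d' L
  by_cases hm : (decide (L ≤ PySem.Str.len s) && PySem.Set.contains (PySem.Set.ofList prefixes) (pvKey s L)) = true
  · rw [if_pos, if_pos hm]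
    · by_cases hcont : d'.contains (pvKey s L) = true
      · rw [if_pos]
        · rfl
        · exact hcont
      · rw [if_neg]
        · show d'.insert _ _ = d'.modify _ PySem.Set.empty _
          unfold PySem.Dict.modify
          rw [PySem.Dict.getD_of_not_contains d' PySem.Set.empty (by simpa using hcont)]
          rfl
        · exact hcont
    · exact hm
  · rw [if_neg, if_neg hm]
    exact hm

-- outer loop
theorem pv_outer (prefixes : List String) (strings : List String) (d : PySem.Dict String (PySem.Set String))
    (hd : d.keys.Nodup) :
    strings.foldl (fun d s => (pvPA s (pvFs prefixes s)).foldl pvStep d) d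
      = strings.foldl (fun d s => (pvPB s (pvMs prefixes s)).foldl pvStep d) d := by
  induction strings generalizing d with
  | nil => rfl
  | cons s strings ih =>
    show strings.foldl _ ((pvPA s (pvFs prefixes s)).foldl pvStep d) = _
    rw [pv_string_step prefixes s d hd]
    exact ih _ (pv_nodup_keys_fold _ _ hd)

-- ===== VERDICT (by name: the statement is the Claim_ definition above) =====
theorem find_prefix_suffixes_spec : Claim_equal_find_prefix_suffixes := by
  intro strings prefixes _
  show find_prefix_suffixes strings prefixes = find_prefix_suffixes_alt strings prefixes
  show (strings.foldl
      (fun prefix_suffix s =>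
        (PySem.List.sorted prefixes (fun x => PySem.Str.len x) true).foldl
          (fun prefix_suffix prefix_ =>
            if PySem.Str.startswith s prefix_ then
              let suf := String.ofList (s.toList.drop prefix_.toList.length)
              if prefix_suffix.contains prefix_ then
                prefix_suffix.modify prefix_ PySem.Set.empty (fun t => PySem.Set.add t suf)
              else
                prefix_suffix.insert prefix_ (PySem.Set.ofList [suf])
            else prefix_suffix)
          prefix_suffix)
      PySem.Dict.empty).items
    = (strings.foldl
      (fun result s =>
        (pvLens prefixes).foldl
          (fun result L =>
            if decide (L ≤ PySem.Str.len s) && PySem.Set.contains (PySem.Set.ofList prefixes) (String.ofList (PySem.List.slice s.toList none (some L))) then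
              let p := String.ofList (PySem.List.slice s.toList none (some L))
              if result.contains p then
                result.modify p PySem.Set.empty
                  (fun t => PySem.Set.add t (String.ofList (PySem.List.slice s.toList (some L) none)))
              else
                result.insert p (PySem.Set.ofList [String.ofList (PySem.List.slice s.toList (some L) none)])
            else result)
          result)
      PySem.Dict.empty).items
  apply congrArg PySem.Dict.items
  have step1 : strings.foldl
      (fun prefix_suffix s =>
        (PySem.List.sorted prefixes (fun x => PySem.Str.len x) true).foldl
          (fun prefix_suffix prefix_ =>
            if PySem.Str.startswith s prefix_ then
              let suf := String.ofList (s.toList.drop prefix_.toList.length)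
              if prefix_suffix.contains prefix_ then
                prefix_suffix.modify prefix_ PySem.Set.empty (fun t => PySem.Set.add t suf)
              else
                prefix_suffix.insert prefix_ (PySem.Set.ofList [suf])
            else prefix_suffix)
          prefix_suffix)
      PySem.Dict.empty
      = strings.foldl (fun d s => (pvPA s (pvFs prefixes s)).foldl pvStep d) PySem.Dict.empty := by
    congr 1
    funext d s
    exact pv_innerA prefixes s d
  have step3 : strings.foldl
      (fun result s =>
        (pvLens prefixes).foldl
          (fun result L =>
            if decide (L ≤ PySem.Str.len s) && PySem.Set.contains (PySem.Set.ofList prefixes) (String.ofList (PySem.List.slice s.toList none (some L))) then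
              let p := String.ofList (PySem.List.slice s.toList none (some L))
              if result.contains p then
                result.modify p PySem.Set.empty
                  (fun t => PySem.Set.add t (String.ofList (PySem.List.slice s.toList (some L) none)))
              else
                result.insert p (PySem.Set.ofList [String.ofList (PySem.List.slice s.toList (some L) none)])
            else result)
          result)
      PySem.Dict.empty
      = strings.foldl (fun d s => (pvPB s (pvMs prefixes s)).foldl pvStep d) PySem.Dict.empty := by
    congr 1
    funext d s
    exact pv_innerB prefixes s d
  exact step1.trans ((pv_outer prefixes strings PySem.Dict.empty PySem.Dict.nodup_keys_empty).trans step3.symm)
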